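-- pv_equiv track=rewrite | github.com/aadarshsingh191198/AAAI-21-SDU-shared-task-1-AI | output_generator.py | fixed_tags
-- ===== SOURCE A (Python) =====
-- def fixed_tags(tags):
--     fixed = []
--     cont = None
--     for tag in tags:
--         if tag == 'O':
--             fixed.append(tag)
--             cont = None
--         else:
--             if cont == tag:
--                 fixed.append(tag.replace("U","I"))
--             else:
--                 fixed.append(tag.replace("U","B"))
--                 cont = tag
--     assert len(list(filter(lambda x: 'long' in x,fixed)))== len(list(filter(lambda x:'long' in x,tags)))
--     assert len(list(filter(lambda x: 'short' in x,fixed)))== len(list(filter(lambda x:'short' in x,tags)))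
--
--     assert len(fixed) == len(tags)
--     return fixed
-- ===== SOURCE B (Python) =====
-- def fixed_tags(tags):
--     out = []
--     i, n = 0, len(tags)
--     while i < n:
--         # find the maximal run of consecutive equal tags starting at i
--         j = i
--         while j < n and tags[j] == tags[i]:
--             j += 1
--         t = tags[i]
--         if t == 'O':
--             out += ['O'] * (j - i)
--         else:
--             out += [t.replace('U', 'B')] + [t.replace('U', 'I')] * (j - i - 1)
--         i = j
--     return out
-- ===== Notes on version B (the rewrite author's own statement) =====
-- stated objective: alternative
-- what changed: Replaced the stateful single pass with a `cont` sentinel by a run-based decomposition: scan maximal runs of identical consecutive tags and emit each whole run at once (all 'O', or B-first then I-repeats); A's always-true asserts are dropped.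
import Mathlib
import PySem

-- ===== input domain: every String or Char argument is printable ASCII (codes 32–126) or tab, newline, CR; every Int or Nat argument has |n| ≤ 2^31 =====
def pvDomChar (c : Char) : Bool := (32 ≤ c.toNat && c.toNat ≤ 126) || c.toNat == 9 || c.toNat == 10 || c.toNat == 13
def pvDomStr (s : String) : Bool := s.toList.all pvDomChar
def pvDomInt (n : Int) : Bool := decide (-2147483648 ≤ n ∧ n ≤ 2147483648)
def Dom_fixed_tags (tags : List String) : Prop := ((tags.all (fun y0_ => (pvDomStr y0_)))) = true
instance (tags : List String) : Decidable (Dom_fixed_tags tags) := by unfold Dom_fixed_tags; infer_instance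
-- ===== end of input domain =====

-- B replaces A's stateful `cont`-sentinel pass by a run-based decomposition (same cost); return values are identical.
-- ===== PORT A =====
-- A's loop: state = (fixed, cont); its trailing asserts compare 'long'/'short' counts and lengths,
-- which can never fail (replace only substitutes 'U' by 'B'/'I'), so A always returns `fixed`.
def fixedStep (st : List String × Option String) (tag : String) : List String × Option String :=
  if tag = "O" then (st.1 ++ [tag], none)
  else if st.2 = some tag then (st.1 ++ [PySem.Str.replace tag "U" "I"], st.2)
  else (st.1 ++ [PySem.Str.replace tag "U" "B"], some tag)

def fixed_tags (tags : List String) : List String :=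
  (tags.foldl fixedStep ([], none)).1

-- ===== PORT B =====
-- B: peel off the maximal run of tags equal to the head, emit the whole run at once, recurse on the rest.
def fixed_tags_alt : List String → List String
  | [] => []
  | t :: rest =>
    let run := rest.takeWhile (· == t)
    (if t = "O" then List.replicate (run.length + 1) "O"
     else PySem.Str.replace t "U" "B" :: List.replicate run.length (PySem.Str.replace t "U" "I"))
    ++ fixed_tags_alt (rest.dropWhile (· == t))
termination_by tags => tags.length
decreasing_by
  simpa using Nat.lt_succ_of_le (List.length_dropWhile_le _ _)

-- ===== PRECONDITION & SPEC =====
def Spec_fixed_tags (tags : List String) (out : List String) : Prop := out = fixed_tags_alt tags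
instance (tags : List String) (out : List String) : Decidable (Spec_fixed_tags tags out) := by unfold Spec_fixed_tags; infer_instance

-- ===== CLAIM (what is proved, stated in full; the proofs are below) =====
def Claim_equal_fixed_tags : Prop := ∀ (tags : List String), Dom_fixed_tags tags → Spec_fixed_tags tags (fixed_tags tags)

-- ===== LEMMAS AND PROOFS =====

-- the stored continuation is irrelevant once the next tag differs from it
lemma foldl_step_cont_irrel (tags : List String) (acc : List String) (t : String)
    (h : ∀ a, tags.head? = some a → a ≠ t) :
    (tags.foldl fixedStep (acc, some t)).1 = (tags.foldl fixedStep (acc, none)).1 := by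
  cases tags with
  | nil => rfl
  | cons a l =>
    have ha : a ≠ t := h a rfl
    simp only [List.foldl_cons, fixedStep]
    by_cases hO : a = "O"
    · simp [hO]
    · simp [hO, Ne.symm ha]

-- processing a run of "O"s from a `none` continuation
lemma foldl_run_O (l : List String) (acc : List String) (h : ∀ x ∈ l, x = "O") :
    l.foldl fixedStep (acc, none) = (acc ++ List.replicate l.length "O", none) := by
  induction l generalizing acc with
  | nil => simp
  | cons a l ih =>
    have ha : a = "O" := h a (by simp)
    have h' : ∀ x ∈ l, x = "O" := fun x hx => h x (by simp [hx])
    rw [List.foldl_cons,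
        show fixedStep (acc, none) a = (acc ++ ["O"], none) by simp [fixedStep, ha],
        ih _ h']
    simp [List.replicate_succ]

-- processing a run of `t`s (t ≠ "O") from continuation `some t`
lemma foldl_run_t (l : List String) (acc : List String) (t : String) (ht : t ≠ "O")
    (h : ∀ x ∈ l, x = t) :
    l.foldl fixedStep (acc, some t)
      = (acc ++ List.replicate l.length (PySem.Str.replace t "U" "I"), some t) := by
  induction l generalizing acc with
  | nil => simp
  | cons a l ih =>
    have ha : a = t := h a (by simp)
    have h' : ∀ x ∈ l, x = t := fun x hx => h x (by simp [hx])
    rw [List.foldl_cons,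
        show fixedStep (acc, some t) a = (acc ++ [PySem.Str.replace t "U" "I"], some t) by
          simp [fixedStep, ha, ht],
        ih _ h']
    simp [List.replicate_succ]

lemma head_dropWhile_ne (p : String → Bool) (l : List String) (a : String)
    (h : (l.dropWhile p).head? = some a) : p a = false := by
  induction l with
  | nil => simp at h
  | cons b l ih =>
    by_cases hb : p b
    · exact ih (by simpa [List.dropWhile_cons, hb] using h)
    · simp [hb] at h
      simpa [h] using hb

lemma fixed_tags_main (tags : List String) : ∀ acc,
    (tags.foldl fixedStep (acc, none)).1 = acc ++ fixed_tags_alt tags := by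
  induction tags using fixed_tags_alt.induct with
  | case1 => simp [fixed_tags_alt]
  | case2 t rest ih =>
    intro acc
    have hsplit : rest = rest.takeWhile (· == t) ++ rest.dropWhile (· == t) :=
      (List.takeWhile_append_dropWhile).symm
    have hrun : ∀ x ∈ rest.takeWhile (· == t), x = t := by
      intro x hx
      have := List.mem_takeWhile_imp hx
      simpa using this
    have hhead : ∀ a, ((rest.dropWhile (· == t)).head? = some a) → a ≠ t := by
      intro a ha
      have := head_dropWhile_ne (· == t) rest a ha
      simpa using this
    rw [fixed_tags_alt]
    conv_lhs => rw [hsplit]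
    by_cases hO : t = "O"
    · subst hO
      rw [List.foldl_cons,
          show fixedStep (acc, none) "O" = (acc ++ ["O"], none) by simp [fixedStep],
          List.foldl_append, foldl_run_O _ _ hrun, ih]
      simp [List.replicate_succ]
    · rw [List.foldl_cons,
          show fixedStep (acc, none) t = (acc ++ [PySem.Str.replace t "U" "B"], some t) by
            simp [fixedStep, hO],
          List.foldl_append, foldl_run_t _ _ t hO hrun,
          foldl_step_cont_irrel _ _ _ hhead, ih]
      simp [hO]

-- ===== VERDICT (by name: the statement is the Claim_ definition above) =====
theorem fixed_tags_spec : Claim_equal_fixed_tags := by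
  intro tags _
  unfold Spec_fixed_tags fixed_tags
  simpa using fixed_tags_main tags []
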